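-- pv_equiv track=rewrite | github.com/yggdrasil-au/RemakeEngine | EnginePy/FormatHandlers/oldExport_txd_modular.py | _part_bits_by_1
-- ===== SOURCE A (Python) =====
-- from typing import List, Optional, Tuple
--
-- def _part_bits_by_1(n: int, bits: int) -> int:
--     """Legacy helper kept for parity; unused but retained for completeness."""
--     mask_shifts: List[Tuple[int, int, int]] = []
--     if bits > 8:
--         mask_shifts.append((0x0000FF00, 0xFF0000FF, 8))
--     if bits > 4:
--         mask_shifts.append((0x00F000F0, 0xF00FF00F, 4))
--     if bits > 2:
--         mask_shifts.append((0x0C0C0C0C, 0xC30C30C3, 2))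
--     if bits > 1:
--         mask_shifts.append((0x22222222, 0x49249249, 1))
--
--     res = 0
--     for i in range(bits):
--         res |= (n & (1 << i)) << i
--     return res
-- ===== SOURCE B (Python) =====
-- def _part_bits_by_1(n: int, bits: int) -> int:
--     # Build the result's binary REPRESENTATION as text: for each bit of n
--     # (MSB first) emit a '0' spacer then the bit's digit, then parse base 2.
--     s = "".join("0" + str((n >> i) & 1) for i in range(bits - 1, -1, -1))
--     return int(s, 2) if s else 0
-- ===== Notes on version B (the rewrite author's own statement) =====
-- stated objective: faster
-- what changed: Replaces A's LSB-first OR-of-shifted-masks accumulation by a text-representation build: emit '0'+bit digit per bit MSB-first, join into a binary string, and parse it once with int(s, 2) (0 for the empty string); A's per-iteration OR into an ever-growing big integer is quadratic in bit operations, B's string build plus one parse is not.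
import Mathlib
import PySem

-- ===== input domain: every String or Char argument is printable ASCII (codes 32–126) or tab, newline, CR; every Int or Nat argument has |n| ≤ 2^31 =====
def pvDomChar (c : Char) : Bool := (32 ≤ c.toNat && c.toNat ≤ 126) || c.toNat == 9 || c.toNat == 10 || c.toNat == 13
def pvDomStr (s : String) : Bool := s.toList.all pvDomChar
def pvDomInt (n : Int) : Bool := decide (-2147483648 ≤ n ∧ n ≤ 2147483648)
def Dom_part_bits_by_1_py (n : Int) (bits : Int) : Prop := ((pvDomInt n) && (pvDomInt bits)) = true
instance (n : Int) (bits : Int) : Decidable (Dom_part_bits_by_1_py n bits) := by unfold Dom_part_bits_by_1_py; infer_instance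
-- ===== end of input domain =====

-- B replaces A's LSB-first OR-of-shifted-masks loop (and its dead mask_shifts table) by a
-- text build: emit '0' + the bit's digit per bit MSB-first, join, and parse the binary string.

-- ===== PORT A =====
-- every i drawn from range(bits) satisfies 0 ≤ i, so `i.toNat` is Python's exact shift amount
def part_bits_by_1_py (n : Int) (bits : Int) : Int :=
  let maskShifts : List (Int × Int × Int) := []
  let maskShifts := if bits > 8 then maskShifts ++ [(0x0000FF00, 0xFF0000FF, 8)] else maskShifts
  let maskShifts := if bits > 4 then maskShifts ++ [(0x00F000F0, 0xF00FF00F, 4)] else maskShifts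
  let maskShifts := if bits > 2 then maskShifts ++ [(0x0C0C0C0C, 0xC30C30C3, 2)] else maskShifts
  let _maskShifts := if bits > 1 then maskShifts ++ [(0x22222222, 0x49249249, 1)] else maskShifts
  (PySem.List.pyRange 0 bits 1).foldl
    (fun res i => PySem.Int.bor res
      (@HShiftLeft.hShiftLeft Int Nat Int Int.instHShiftLeftNat
        (PySem.Int.band n (1 <<< i.toNat)) i.toNat)) 0
  -- the explicit instance is `x <<< i` by a Nat amount (the core Int-by-Nat shift, Python-exact
  -- per PYSEM; plain `<<<` notation here would elaborate to Mathlib's Int-by-Int instance)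

-- ===== PORT B =====
-- range(bits-1, -1, -1) is pyRange (bits-1) (-1) (-1); i ≥ 0 on it, so `i.toNat` is exact.
-- int(s, 2) is ported by hand as the base-2 Horner fold over the digit chars — exact here
-- since s consists only of '0'/'1' characters (each str((n>>i)&1) is "0" or "1").
def part_bits_by_1_py_alt (n : Int) (bits : Int) : Int :=
  let s : List Char :=
    (PySem.List.pyRange (bits - 1) (-1) (-1)).flatMap
      (fun i => '0' :: (PySem.Int.toStr (PySem.Int.band (n >>> i.toNat) 1)).toList)
  if s = [] then 0
  else s.foldl (fun acc c => acc * 2 + (if c = '1' then 1 else 0)) 0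

-- ===== PRECONDITION & SPEC =====
def Spec_part_bits_by_1_py (n : Int) (bits : Int) (out : Int) : Prop := out = part_bits_by_1_py_alt n bits
instance (n : Int) (bits : Int) (out : Int) : Decidable (Spec_part_bits_by_1_py n bits out) := by unfold Spec_part_bits_by_1_py; infer_instance

-- ===== CLAIM =====
def Claim_equal_part_bits_by_1_py : Prop := ∀ (n : Int) (bits : Int), Dom_part_bits_by_1_py n bits → Spec_part_bits_by_1_py n bits (part_bits_by_1_py n bits)

-- ===== LEMMAS AND PROOFS =====

-- the common value: sum over i < b of bit_i(n) * 4^i, top term added last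
def pvS (n : Int) : Nat → Int
  | 0 => 0
  | b + 1 => pvS n b + PySem.Int.mod (n >>> b) 2 * 4 ^ b

lemma pvS_bounds (n : Int) (b : Nat) : 0 ≤ pvS n b ∧ pvS n b < 4 ^ b := by
  induction b with
  | zero => simp [pvS]
  | succ b ih =>
    have h0 := PySem.Int.mod_nonneg (n >>> b) (b := 2) (by norm_num)
    have h1 := PySem.Int.mod_lt (n >>> b) (b := 2) (by norm_num)
    have hp : (0:Int) < 4 ^ b := by positivity
    constructor
    · simp only [pvS]; nlinarith
    · simp only [pvS, pow_succ]; nlinarith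

-- n & (1 << i) picks bit i of n (Python two's-complement semantics, for every n)
lemma pvMask (n : Int) (i : Nat) :
    PySem.Int.band n (1 <<< i) = PySem.Int.mod (n >>> i) 2 * 2 ^ i := by
  have hsh : (1 <<< i : Nat) = 2 ^ i := by rw [Nat.shiftLeft_eq, one_mul]
  rw [hsh]
  by_cases h : 0 ≤ n
  · -- n ≥ 0: reduce to Nat
    obtain ⟨m, rfl⟩ := Int.eq_ofNat_of_zero_le h
    rw [PySem.Int.band_natCast, ← Int.natCast_shiftRight]
    have hmod : PySem.Int.mod ((m >>> i : Nat) : Int) 2 = ((m >>> i % 2 : Nat) : Int) := by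
      exact_mod_cast PySem.Int.mod_natCast (m >>> i) 2
    rw [hmod, Nat.and_two_pow, Nat.testBit_eq_decide_div_mod_eq, Nat.shiftRight_eq_div_pow]
    rcases Nat.mod_two_eq_zero_or_one (m / 2 ^ i) with hm | hm <;> simp [hm]
  · -- n < 0: n = -[m+1], Python's arithmetic right shift and two's-complement and
    obtain ⟨m, rfl⟩ : ∃ m : Nat, n = Int.negSucc m := by
      refine ⟨(-n - 1).toNat, ?_⟩
      have := Int.toNat_of_nonneg (show (0:Int) ≤ -n - 1 by omega)
      rw [Int.negSucc_eq]; omega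
    have hband : PySem.Int.band (Int.negSucc m) ((2 ^ i : Nat) : Int)
        = ((2 ^ i - (2 ^ i &&& m) : Nat) : Int) := by
      simp only [PySem.Int.band]
      rw [if_neg (by omega), if_pos (by positivity)]
      have e1 : (((2 ^ i : Nat) : Int)).toNat = 2 ^ i := Int.toNat_natCast _
      have e2 : (-Int.negSucc m - 1).toNat = m := by rw [Int.negSucc_eq]; omega
      rw [e1, e2]
    rw [hband, Int.negSucc_shiftRight]
    have hmod : PySem.Int.mod (Int.negSucc (m >>> i)) 2
        = 1 - ((m >>> i % 2 : Nat) : Int) := by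
      rw [PySem.Int.mod_eq_emod_of_pos (by norm_num), Int.negSucc_eq]
      omega
    rw [hmod, Nat.two_pow_and, Nat.testBit_eq_decide_div_mod_eq, Nat.shiftRight_eq_div_pow]
    rcases Nat.mod_two_eq_zero_or_one (m / 2 ^ i) with hm | hm <;> simp [hm]

-- A's loop computes pvS
lemma pvA (n : Int) (b : Nat) :
    (List.range b).foldl
      (fun res k => PySem.Int.bor res ((PySem.Int.band n (1 <<< k)) <<< k)) 0 = pvS n b := by
  induction b with
  | zero => simp [pvS]
  | succ b ih =>
    rw [List.range_succ, List.foldl_append, ih, List.foldl_cons, List.foldl_nil]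
    rw [pvMask, Int.shiftLeft_eq]
    have h0 := PySem.Int.mod_nonneg (n >>> b) (b := 2) (by norm_num)
    have h1 := PySem.Int.mod_lt (n >>> b) (b := 2) (by norm_num)
    have hm : PySem.Int.mod (n >>> b) 2 = 0 ∨ PySem.Int.mod (n >>> b) 2 = 1 := by omega
    have hpow : (2:Int) ^ b * 2 ^ b = 4 ^ b := by
      rw [← pow_add, show (4:Int) = 2 ^ 2 by norm_num, ← pow_mul]; ring_nf
    rcases hm with hm | hm
    · rw [hm, zero_mul, zero_mul, PySem.Int.bor_zero]
      simp only [pvS]; rw [hm]; ring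
    · rw [hm, one_mul, hpow]
      simp only [pvS]; rw [hm, one_mul]
      obtain ⟨hge, hlt⟩ := pvS_bounds n b
      have hc : ((4:Int) ^ b) = ((2 ^ (2 * b) : Nat) : Int) := by
        push_cast; rw [pow_mul]; norm_num
      have hlt' : (pvS n b).toNat < 2 ^ (2 * b) := by omega
      have h4 : ((4:Int) ^ b).toNat = 2 ^ (2 * b) := by omega
      have hor := Nat.two_pow_add_eq_or_of_lt hlt' 1
      rw [Nat.mul_one] at hor
      have key : (pvS n b).toNat ||| ((4:Int) ^ b).toNat = (pvS n b).toNat + 2 ^ (2 * b) := by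
        rw [h4, Nat.lor_comm, ← hor]; omega
      rw [PySem.Int.bor_of_nonneg hge (by positivity), key, Nat.cast_add,
        Int.toNat_of_nonneg hge, ← h4,
        Int.toNat_of_nonneg (show (0:Int) ≤ 4 ^ b by positivity)]

-- B's digit string for bit k: '0' then the bit's digit
def pvDig (n : Int) (k : Nat) : List Char :=
  '0' :: (PySem.Int.toStr (PySem.Int.band (n >>> k) 1)).toList

lemma pvDig_eq (n : Int) (k : Nat) :
    pvDig n k = ['0', if PySem.Int.mod (n >>> k) 2 = 1 then '1' else '0'] := by
  unfold pvDig
  rw [PySem.Int.band_one]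
  have h0 := PySem.Int.mod_nonneg (n >>> k) (b := 2) (by norm_num)
  have h1 := PySem.Int.mod_lt (n >>> k) (b := 2) (by norm_num)
  have hm : PySem.Int.mod (n >>> k) 2 = 0 ∨ PySem.Int.mod (n >>> k) 2 = 1 := by omega
  rcases hm with hm | hm <;> rw [hm] <;> simp <;> decide

-- B's char fold over the MSB-first digit pairs computes pvS
lemma pvB (n : Int) (b : Nat) (a : Int) :
    (((List.range b).reverse).flatMap (pvDig n)).foldl
      (fun (acc : Int) (c : Char) => acc * 2 + (if c = '1' then 1 else 0)) a
      = a * 4 ^ b + pvS n b := by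
  induction b generalizing a with
  | zero => simp [pvS]
  | succ b ih =>
    rw [List.range_succ, List.reverse_append, List.reverse_singleton, List.singleton_append,
      List.flatMap_cons, List.foldl_append, pvDig_eq]
    have h0 := PySem.Int.mod_nonneg (n >>> b) (b := 2) (by norm_num)
    have h1 := PySem.Int.mod_lt (n >>> b) (b := 2) (by norm_num)
    have hm : PySem.Int.mod (n >>> b) 2 = 0 ∨ PySem.Int.mod (n >>> b) 2 = 1 := by omega
    have hstep : ∀ v : Int,
        ([('0' : Char), if PySem.Int.mod (n >>> b) 2 = 1 then '1' else '0'].foldl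
          (fun (acc : Int) (c : Char) => acc * 2 + (if c = '1' then 1 else 0)) v)
          = v * 4 + PySem.Int.mod (n >>> b) 2 := by
      intro v
      rcases hm with hm | hm <;> rw [hm] <;> simp <;> ring
    rw [hstep, ih]
    simp only [pvS, pow_succ]
    ring

lemma pvRange_rev (bits : Int) (h : 0 ≤ bits) :
    PySem.List.pyRange (bits - 1) (-1) (-1) = (PySem.List.pyRange 0 bits 1).reverse := by
  rw [PySem.List.pyRange_neg_one_eq_reverse]
  norm_num

-- ===== VERDICT (by name: the statement is the Claim_ definition above) =====
theorem part_bits_by_1_py_spec : Claim_equal_part_bits_by_1_py := by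
  intro n bits _
  show part_bits_by_1_py n bits = part_bits_by_1_py_alt n bits
  simp only [part_bits_by_1_py, part_bits_by_1_py_alt]
  by_cases h : 0 ≤ bits
  · obtain ⟨b, rfl⟩ := Int.eq_ofNat_of_zero_le h
    rw [pvRange_rev _ h, PySem.List.pyRange_zero_natCast, List.foldl_map,
      ← List.map_reverse, List.flatMap_map]
    simp only [Int.toNat_natCast, Int.shiftRight_natCast_right]
    rw [pvA]
    rw [show (fun a : Nat => ('0' : Char) :: (PySem.Int.toStr (PySem.Int.band (n >>> a) 1)).toList)
      = pvDig n from rfl]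
    split
    · next he =>
      -- empty digit string forces b = 0
      cases b with
      | zero => simp [pvS]
      | succ b =>
        exfalso
        rw [List.range_succ, List.reverse_append] at he
        simp [pvDig] at he
    · rw [pvB n b 0, zero_mul, zero_add]
  · have he : PySem.List.pyRange 0 bits 1 = [] :=
      PySem.List.pyRange_one_eq_nil (by omega)
    have he2 : PySem.List.pyRange (bits - 1) (-1) (-1) = [] :=
      PySem.List.pyRange_neg_one_eq_nil (by omega)
    rw [he, he2]
    simp
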